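-- pv_equiv track=rewrite | github.com/77SSD/AI-SEM4 | AI-2/5.py | oneadder
-- ===== SOURCE A (Python) =====
-- def oneadder(state1, state2):
--     heu=0
--     for m,i in enumerate(state1):
--         for n,j in enumerate(i):
--             for p,x in enumerate(state2):
--                 for q,y in enumerate(x):
--                     if j == y:
--                         if n == q and m==p:
--                             heu+=1
--     return -heu
-- ===== SOURCE B (Python) =====
-- def oneadder(state1, state2):
--     heu = 0
--     for r1, r2 in zip(state1, state2):
--         for a, b in zip(r1, r2):
--             if a == b:
--                 heu += 1
--     return -heu
-- ===== Notes on version B (the rewrite author's own statement) =====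
-- stated objective: faster
-- what changed: B replaces A's quadruple nested scan over all cell pairs of both grids with a single pass over zip(state1,state2)/zip(row1,row2) comparing cells at the same position directly.
import Mathlib
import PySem

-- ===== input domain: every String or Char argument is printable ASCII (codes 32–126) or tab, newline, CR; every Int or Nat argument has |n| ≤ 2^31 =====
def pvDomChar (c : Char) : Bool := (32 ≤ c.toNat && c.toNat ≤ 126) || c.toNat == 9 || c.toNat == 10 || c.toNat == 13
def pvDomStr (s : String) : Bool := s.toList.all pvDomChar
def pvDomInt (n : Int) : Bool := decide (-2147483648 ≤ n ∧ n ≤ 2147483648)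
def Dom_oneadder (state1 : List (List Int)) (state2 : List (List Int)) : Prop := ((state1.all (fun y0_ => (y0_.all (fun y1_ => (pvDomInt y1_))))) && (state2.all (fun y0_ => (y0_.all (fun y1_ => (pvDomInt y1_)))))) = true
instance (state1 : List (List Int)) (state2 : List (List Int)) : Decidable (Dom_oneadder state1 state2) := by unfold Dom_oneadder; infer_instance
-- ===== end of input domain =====

-- B replaces A's all-pairs quadruple loop with a single zip pass over the two grids; proved equal on all inputs.

-- ===== PORT A =====
def oneadder (state1 : List (List Int)) (state2 : List (List Int)) : Int :=
  let heu : Int := 0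
  let heu := (PySem.List.enumerate state1 0).foldl (fun heu mi =>
    (PySem.List.enumerate mi.2 0).foldl (fun heu nj =>
      (PySem.List.enumerate state2 0).foldl (fun heu px =>
        (PySem.List.enumerate px.2 0).foldl (fun heu qy =>
          if nj.2 = qy.2 then
            if nj.1 = qy.1 ∧ mi.1 = px.1 then heu + 1 else heu
          else heu) heu) heu) heu) heu;
  -heu

-- ===== PORT B =====
def oneadder_alt (state1 : List (List Int)) (state2 : List (List Int)) : Int :=
  let heu : Int := 0
  let heu := (state1.zip state2).foldl (fun heu rr =>
    (rr.1.zip rr.2).foldl (fun heu ab => if ab.1 = ab.2 then heu + 1 else heu) heu) heu;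
  -heu

-- ===== PRECONDITION & SPEC =====
def Spec_oneadder (state1 : List (List Int)) (state2 : List (List Int)) (out : Int) : Prop := out = oneadder_alt state1 state2
instance (state1 : List (List Int)) (state2 : List (List Int)) (out : Int) : Decidable (Spec_oneadder state1 state2 out) := by unfold Spec_oneadder; infer_instance

-- ===== CLAIM (what is proved, stated in full; the proofs are below) =====
def Claim_equal_oneadder : Prop := ∀ (state1 : List (List Int)) (state2 : List (List Int)), Dom_oneadder state1 state2 → Spec_oneadder state1 state2 (oneadder state1 state2)

-- ===== LEMMAS AND PROOFS =====

-- count, over cells of one state2 row enumerated from t, of matches with (value j, column n)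
def cnt4 : List Int → Nat → Int → Int → Int
  | [], _, _, _ => 0
  | y :: x, t, n, j => (if j = y ∧ n = (t : Int) then 1 else 0) + cnt4 x (t+1) n j

-- count over rows of state2 enumerated from t, for a state1 cell at (m, n) with value j
def cnt3 : List (List Int) → Nat → Int → Int → Int → Int
  | [], _, _, _, _ => 0
  | x :: r, t, m, n, j => (if m = (t : Int) then cnt4 x 0 n j else 0) + cnt3 r (t+1) m n j

-- count over cells of one state1 row (row index m), columns enumerated from t
def cnt2 : List Int → Nat → Int → List (List Int) → Int
  | [], _, _, _ => 0
  | j :: i, t, m, s2 => cnt3 s2 0 m (t : Int) j + cnt2 i (t+1) m s2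

-- count over rows of state1 enumerated from t
def cnt1 : List (List Int) → Nat → List (List Int) → Int
  | [], _, _ => 0
  | i :: r, t, s2 => cnt2 i 0 (t : Int) s2 + cnt1 r (t+1) s2

-- number of equal same-position pairs of one zipped row (B's inner loop from 0)
def rowB (r1 r2 : List Int) : Int :=
  (r1.zip r2).foldl (fun h ab => if ab.1 = ab.2 then h + 1 else h) 0

def bsum : List (List Int × List Int) → Int
  | [] => 0
  | rr :: l => rowB rr.1 rr.2 + bsum l

lemma E4 (n j : Int) (c : Prop) [Decidable c] :
    ∀ (x : List Int) (t : Nat) (h : Int),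
    (PySem.List.enumerate x (t : Int)).foldl
      (fun heu qy => if j = qy.2 then if n = qy.1 ∧ c then heu + 1 else heu else heu) h
    = h + (if c then cnt4 x t n j else 0) := by
  intro x
  induction x with
  | nil => intro t h; simp [PySem.List.enumerate_nil, cnt4]
  | cons y x ih =>
    intro t h
    have hc : (t : Int) + 1 = ((t + 1 : Nat) : Int) := by push_cast; ring
    rw [PySem.List.enumerate_cons, List.foldl_cons, hc]
    rw [ih]
    simp only [cnt4]
    split_ifs <;> simp_all <;> ring

lemma E3 (m n j : Int) :
    ∀ (s2 : List (List Int)) (t : Nat) (h : Int),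
    (PySem.List.enumerate s2 (t : Int)).foldl
      (fun heu px =>
        (PySem.List.enumerate px.2 0).foldl
          (fun heu qy => if j = qy.2 then if n = qy.1 ∧ m = px.1 then heu + 1 else heu else heu) heu) h
    = h + cnt3 s2 t m n j := by
  intro s2
  induction s2 with
  | nil => intro t h; simp [PySem.List.enumerate_nil, cnt3]
  | cons x r ih =>
    intro t h
    have hc : (t : Int) + 1 = ((t + 1 : Nat) : Int) := by push_cast; ring
    rw [PySem.List.enumerate_cons, List.foldl_cons]
    dsimp only
    rw [hc, ih]
    have h4 := E4 n j (m = (t : Int)) x 0 h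
    rw [Nat.cast_zero] at h4
    rw [h4]
    simp only [cnt3]
    ring

lemma E2 (m : Int) (s2 : List (List Int)) :
    ∀ (i : List Int) (t : Nat) (h : Int),
    (PySem.List.enumerate i (t : Int)).foldl
      (fun heu nj =>
        (PySem.List.enumerate s2 0).foldl
          (fun heu px =>
            (PySem.List.enumerate px.2 0).foldl
              (fun heu qy => if nj.2 = qy.2 then if nj.1 = qy.1 ∧ m = px.1 then heu + 1 else heu else heu) heu) heu) h
    = h + cnt2 i t m s2 := by
  intro i
  induction i with
  | nil => intro t h; simp [PySem.List.enumerate_nil, cnt2]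
  | cons j i ih =>
    intro t h
    have hc : (t : Int) + 1 = ((t + 1 : Nat) : Int) := by push_cast; ring
    rw [PySem.List.enumerate_cons, List.foldl_cons]
    dsimp only
    rw [hc, ih]
    have h3 := E3 m (t : Int) j s2 0 h
    rw [Nat.cast_zero] at h3
    rw [h3]
    simp only [cnt2]
    ring

lemma E1 (s2 : List (List Int)) :
    ∀ (s1 : List (List Int)) (t : Nat) (h : Int),
    (PySem.List.enumerate s1 (t : Int)).foldl
      (fun heu mi =>
        (PySem.List.enumerate mi.2 0).foldl
          (fun heu nj =>
            (PySem.List.enumerate s2 0).foldl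
              (fun heu px =>
                (PySem.List.enumerate px.2 0).foldl
                  (fun heu qy => if nj.2 = qy.2 then if nj.1 = qy.1 ∧ mi.1 = px.1 then heu + 1 else heu else heu) heu) heu) heu) h
    = h + cnt1 s1 t s2 := by
  intro s1
  induction s1 with
  | nil => intro t h; simp [PySem.List.enumerate_nil, cnt1]
  | cons i r ih =>
    intro t h
    have hc : (t : Int) + 1 = ((t + 1 : Nat) : Int) := by push_cast; ring
    rw [PySem.List.enumerate_cons, List.foldl_cons]
    dsimp only
    rw [hc, ih]
    have h2 := E2 (t : Int) s2 i 0 h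
    rw [Nat.cast_zero] at h2
    rw [h2]
    simp only [cnt1]
    ring

lemma cnt4_zero (n j : Int) : ∀ (x : List Int) (t : Nat), n < (t : Int) → cnt4 x t n j = 0 := by
  intro x
  induction x with
  | nil => intro t _; rfl
  | cons y x ih =>
    intro t hlt
    simp only [cnt4]
    rw [ih (t+1) (by push_cast; omega)]
    have : ¬ (j = y ∧ n = (t : Int)) := by rintro ⟨_, rfl⟩; omega
    simp [this]

lemma cnt4_at (j : Int) : ∀ (x : List Int) (t k : Nat),
    cnt4 x t ((t + k : Nat) : Int) j = (x[k]?.elim 0 (fun y => if j = y then 1 else 0)) := by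
  intro x
  induction x with
  | nil => intro t k; rfl
  | cons y x ih =>
    intro t k
    cases k with
    | zero =>
      simp only [cnt4]
      rw [cnt4_zero _ j x (t+1) (by push_cast; omega)]
      simp
    | succ k =>
      have h1 : ((t + (k+1) : Nat) : Int) = (((t+1) + k : Nat) : Int) := by push_cast; ring
      simp only [cnt4]
      rw [h1, ih (t+1) k]
      have hne : ¬ (j = y ∧ (((t+1) + k : Nat) : Int) = (t : Int)) := by
        rintro ⟨_, h⟩; push_cast at h; omega
      rw [if_neg hne]
      have h2 : (1:Nat) + k = k + 1 := Nat.add_comm 1 k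
      simp [h2]

lemma cnt3_zero (m n j : Int) : ∀ (s2 : List (List Int)) (t : Nat), m < (t : Int) → cnt3 s2 t m n j = 0 := by
  intro s2
  induction s2 with
  | nil => intro t _; rfl
  | cons x r ih =>
    intro t hlt
    simp only [cnt3]
    rw [ih (t+1) (by push_cast; omega)]
    have : ¬ m = (t : Int) := by rintro rfl; omega
    simp [this]

lemma cnt3_at (n j : Int) : ∀ (s2 : List (List Int)) (t k : Nat),
    cnt3 s2 t ((t + k : Nat) : Int) n j = (s2[k]?.elim 0 (fun x => cnt4 x 0 n j)) := by
  intro s2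
  induction s2 with
  | nil => intro t k; rfl
  | cons x r ih =>
    intro t k
    cases k with
    | zero =>
      simp only [cnt3]
      rw [cnt3_zero _ n j r (t+1) (by push_cast; omega)]
      simp
    | succ k =>
      have h1 : ((t + (k+1) : Nat) : Int) = (((t+1) + k : Nat) : Int) := by push_cast; ring
      simp only [cnt3]
      rw [h1, ih (t+1) k]
      have hne : ¬ (((t+1) + k : Nat) : Int) = (t : Int) := by
        intro h; push_cast at h; omega
      rw [if_neg hne]
      have h2 : (1:Nat) + k = k + 1 := Nat.add_comm 1 k
      simp [h2]

lemma rowB_cons (a b : Int) (r1 r2 : List Int) :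
    rowB (a :: r1) (b :: r2) = (if a = b then 1 else 0) + rowB r1 r2 := by
  have shift : ∀ (l : List (Int × Int)) (h : Int),
      l.foldl (fun h ab => if ab.1 = ab.2 then h + 1 else h) h
      = h + l.foldl (fun h ab => if ab.1 = ab.2 then h + 1 else h) 0 := by
    intro l
    induction l with
    | nil => intro h; simp
    | cons ab l ih =>
      intro h
      simp only [List.foldl_cons]
      rw [ih, ih (if ab.1 = ab.2 then 0 + 1 else 0)]
      split_ifs <;> ring
  simp only [rowB, List.zip_cons_cons, List.foldl_cons]
  rw [shift]
  split_ifs <;> ring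

lemma cnt2_eq (s2 : List (List Int)) (mN : Nat) : ∀ (i : List Int) (t : Nat),
    cnt2 i t ((mN : Nat) : Int) s2
    = (s2[mN]?.elim 0 (fun x =>
        ((i.zip (x.drop t)).foldl (fun h ab => if ab.1 = ab.2 then h + 1 else h) 0))) := by
  intro i
  induction i with
  | nil =>
    intro t
    cases h : s2[mN]? <;> simp [cnt2, Option.elim]
  | cons j i ih =>
    intro t
    simp only [cnt2]
    have h3 : cnt3 s2 0 ((mN : Nat) : Int) (t : Int) j
        = (s2[mN]?.elim 0 (fun x => cnt4 x 0 (t : Int) j)) := by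
      have := cnt3_at (t : Int) j s2 0 mN
      simpa using this
    rw [h3, ih (t+1)]
    cases hx : s2[mN]? with
    | none => simp [Option.elim]
    | some x =>
      simp only [Option.elim]
      have h4 : cnt4 x 0 ((0 + t : Nat) : Int) j = (x[t]?.elim 0 (fun y => if j = y then 1 else 0)) :=
        cnt4_at j x 0 t
      simp only [Nat.zero_add] at h4
      rw [h4]
      cases hy : x[t]? with
      | none =>
        have hlen : x.length ≤ t := by
          by_contra hcon
          push_neg at hcon
          simp [List.getElem?_eq_getElem hcon] at hy
        rw [List.drop_eq_nil_of_le hlen, List.drop_eq_nil_of_le (by omega)]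
        simp [Option.elim]
      | some y =>
        have hlt : t < x.length := by
          by_contra hcon
          push_neg at hcon
          simp [List.getElem?_eq_none_iff.mpr hcon] at hy
        have hdrop : x.drop t = y :: x.drop (t+1) := by
          rw [List.drop_eq_getElem_cons hlt]
          have : x[t] = y := by
            have := List.getElem?_eq_getElem hlt
            rw [hy] at this
            exact (Option.some_inj.mp this.symm)
          rw [this]
        rw [hdrop]
        have hr := rowB_cons j y i (x.drop (t+1))
        simp only [rowB] at hr
        rw [hr]
        simp [Option.elim]

lemma cnt1_eq (s2 : List (List Int)) : ∀ (s1 : List (List Int)) (t : Nat),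
    cnt1 s1 t s2 = bsum (s1.zip (s2.drop t)) := by
  intro s1
  induction s1 with
  | nil => intro t; simp [cnt1, bsum]
  | cons i r ih =>
    intro t
    simp only [cnt1]
    rw [ih (t+1), cnt2_eq s2 t i 0]
    cases hx : s2[t]? with
    | none =>
      have hlen : s2.length ≤ t := by
        by_contra hcon
        push_neg at hcon
        simp [List.getElem?_eq_getElem hcon] at hx
      rw [List.drop_eq_nil_of_le hlen, List.drop_eq_nil_of_le (by omega)]
      simp [Option.elim, bsum]
    | some x =>
      have hlt : t < s2.length := by
        by_contra hcon
        push_neg at hcon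
        simp [List.getElem?_eq_none_iff.mpr hcon] at hx
      have hdrop : s2.drop t = x :: s2.drop (t+1) := by
        rw [List.drop_eq_getElem_cons hlt]
        have : s2[t] = x := by
          have := List.getElem?_eq_getElem hlt
          rw [hx] at this
          exact (Option.some_inj.mp this.symm)
        rw [this]
      rw [hdrop]
      simp [Option.elim, bsum, rowB]

lemma alt_eq (s1 s2 : List (List Int)) : oneadder_alt s1 s2 = -(bsum (s1.zip s2)) := by
  have shift : ∀ (l : List (Int × Int)) (h : Int),
      l.foldl (fun h ab => if ab.1 = ab.2 then h + 1 else h) h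
      = h + l.foldl (fun h ab => if ab.1 = ab.2 then h + 1 else h) 0 := by
    intro l
    induction l with
    | nil => intro h; simp
    | cons ab l ih =>
      intro h
      simp only [List.foldl_cons]
      rw [ih, ih (if ab.1 = ab.2 then 0 + 1 else 0)]
      split_ifs <;> ring
  have outer : ∀ (l : List (List Int × List Int)) (h : Int),
      l.foldl (fun heu rr => (rr.1.zip rr.2).foldl (fun h ab => if ab.1 = ab.2 then h + 1 else h) heu) h
      = h + bsum l := by
    intro l
    induction l with
    | nil => intro h; simp [bsum]
    | cons rr l ih =>
      intro h
      simp only [List.foldl_cons]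
      rw [shift, ih]
      simp only [bsum, rowB]
      ring
  simp only [oneadder_alt]
  rw [outer]
  ring

-- ===== VERDICT (by name: the statement is the Claim_ definition above) =====
theorem oneadder_spec : Claim_equal_oneadder := by
  intro s1 s2 _
  unfold Spec_oneadder
  have hA : oneadder s1 s2 = -(cnt1 s1 0 s2) := by
    simp only [oneadder]
    have h1 := E1 s2 s1 0 0
    rw [Nat.cast_zero] at h1
    rw [h1]
    ring
  rw [hA, alt_eq, cnt1_eq s2 s1 0]
  simp
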